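-- pv_equiv track=rewrite | github.com/orlykor/intro2cs-ex6 | balanced_brackets.py | match_brackets
-- ===== SOURCE A (Python) =====
-- def match_brackets(s):
--     '''
--     this func checks if the string is balanced or not, if not it returns an
--     empty list, if it is then it goes into the inside func. the inside func
--     checks for matched brackets between '(' and its matched ')' recursivly.
--     when it finds the matched ')' it replace the bracket's place for the
--     distance between them. for ')' it puts it with negetive num.
--     if there's none of them it replacs the value with the value '0'.
--     when it finishes recursivly it returns the new string with the changes.
--     '''
--     counter = 0
--     i = 0
--     lst1 = list(s)
--     lst = []
--     NOT_BRACKETS = 0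
--
--     while i < len(s):
--         if lst1[i] == "(" :
--             counter += 1
--         elif lst1[i] == ")":
--             counter -= 1
--         else:
--             lst1[i] = 0
--         if counter < 0:
--             return lst
--         i += 1
--     if counter > 0 or counter < 0:
--         return lst
--     else:
--         lst = lst1
--
--     def helper(lst):
--         counter = 0
--         for i in range(len(lst)):
--             if lst[i] == "(":
--                 c_open = i
--             else:
--                 if lst[i] != "(" and lst[i] != ")":
--                     counter += 1
--         if counter == len(lst):
--             return lst
--         c_close = c_open
--         for j in lst[c_open:]: #goes from where we found the last "("
--             if j == ")":
--                 lst[c_open] = c_close - c_open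
--                 lst[c_close] = c_open - c_close
--                 break
--             else:
--                 c_close += 1
--         return helper(lst)
--
--     new_list = helper(lst)
--     return new_list
-- ===== SOURCE B (Python) =====
-- def match_brackets(s):
--     out = [0] * len(s)
--     stack = []
--     for j, c in enumerate(s):
--         if c == '(':
--             stack.append(j)
--         elif c == ')':
--             if not stack:
--                 return []
--             i = stack.pop()
--             out[i] = j - i
--             out[j] = i - j
--     if stack:
--         return []
--     return out
-- ===== Notes on version B (the rewrite author's own statement) =====
-- stated objective: faster
-- what changed: Replaced the repeated full-list rescans (recursive helper that re-finds the last '(' and its ')' each round) with a single left-to-right pass keeping a stack of open-bracket indices.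
import Mathlib
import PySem

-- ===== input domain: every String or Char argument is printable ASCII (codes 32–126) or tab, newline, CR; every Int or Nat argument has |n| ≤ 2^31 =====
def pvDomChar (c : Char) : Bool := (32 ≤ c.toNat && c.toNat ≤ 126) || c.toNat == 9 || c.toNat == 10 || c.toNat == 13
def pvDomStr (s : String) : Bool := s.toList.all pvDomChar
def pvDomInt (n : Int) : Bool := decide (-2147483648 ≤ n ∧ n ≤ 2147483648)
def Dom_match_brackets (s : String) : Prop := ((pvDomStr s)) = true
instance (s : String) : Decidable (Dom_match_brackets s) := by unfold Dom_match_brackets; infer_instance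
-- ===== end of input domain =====

-- B replaces A's quadratic rescanning recursion by one linear pass with a stack of
-- open-bracket indices (objective: faster, asymptotically).

-- ===== PORT A =====
-- Python's lst1 holds a mix of bracket characters and ints; PvE is that mixed element type.
inductive PvE : Type
  | op : PvE
  | cl : PvE
  | num : Int → PvE
deriving DecidableEq, Repr

def pvToInt0 : PvE → Int
  | .num n => n
  | _ => 0

-- the first while-loop: counts brackets, replaces non-brackets by 0, early-returns (none) on counter<0
def pvFirstLoopA : List Char → Int → List PvE → Option (Int × List PvE)
  | [], counter, acc => some (counter, acc.reverse)
  | c :: rest, counter, acc =>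
    let p := if c = '(' then (counter + 1, PvE.op)
             else if c = ')' then (counter - 1, PvE.cl)
             else (counter, PvE.num 0)
    if p.1 < 0 then none else pvFirstLoopA rest p.1 (p.2 :: acc)

-- helper's first for-loop: counter counts non-bracket entries, c_open is the last '(' index
def pvLoop1A : List PvE → Nat → Int → Option Nat → Int × Option Nat
  | [], _, counter, copen => (counter, copen)
  | e :: rest, i, counter, copen =>
    if e = PvE.op then pvLoop1A rest (i + 1) counter (some i)
    else if e ≠ PvE.op ∧ e ≠ PvE.cl then pvLoop1A rest (i + 1) (counter + 1) copen
    else pvLoop1A rest (i + 1) counter copen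

-- helper's second for-loop: first ')' at or after c_open (c_close counter), none if the loop ends without break
def pvFindCloseA : List PvE → Nat → Option Nat
  | [], _ => none
  | e :: rest, c => if e = PvE.cl then some c else pvFindCloseA rest (c + 1)

-- the recursive helper; fuel only makes the same recursion total (Python recurses until no brackets remain)
def pvHelperA : Nat → List PvE → List PvE
  | 0, lst => lst
  | fuel + 1, lst =>
    let r := pvLoop1A lst 0 0 none
    if r.1 = (lst.length : Int) then lst
    else
      let copen := r.2.getD 0   -- Python's c_open is always bound here on inputs that reach helper
      match pvFindCloseA (lst.drop copen) copen with
      | some cclose =>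
          pvHelperA fuel ((lst.set copen (PvE.num ((cclose : Int) - (copen : Int)))).set cclose
            (PvE.num ((copen : Int) - (cclose : Int))))
      | none => pvHelperA fuel lst

def match_brackets (s : String) : List Int :=
  match pvFirstLoopA s.toList 0 [] with
  | none => []
  | some (counter, lst1) =>
    if counter > 0 ∨ counter < 0 then []
    else (pvHelperA (lst1.length + 1) lst1).map pvToInt0

-- ===== PORT B =====
def pvBLoop : List Char → Nat → List Nat → List Int → Option (List Int)
  | [], _, stack, out => if stack.isEmpty then some out else none
  | c :: rest, j, stack, out =>
    if c = '(' then pvBLoop rest (j + 1) (j :: stack) out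
    else if c = ')' then
      match stack with
      | [] => none
      | i :: st => pvBLoop rest (j + 1) st ((out.set i ((j : Int) - (i : Int))).set j ((i : Int) - (j : Int)))
    else pvBLoop rest (j + 1) stack out

def match_brackets_alt (s : String) : List Int :=
  match pvBLoop s.toList 0 [] (List.replicate s.toList.length 0) with
  | some out => out
  | none => []

-- ===== PRECONDITION & SPEC =====
def Spec_match_brackets (s : String) (out : List Int) : Prop := out = match_brackets_alt s
instance (s : String) (out : List Int) : Decidable (Spec_match_brackets s out) := by unfold Spec_match_brackets; infer_instance

-- ===== CLAIM (what is proved, stated in full; the proofs are below) =====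
def Claim_equal_match_brackets : Prop := ∀ (s : String), Dom_match_brackets s → Spec_match_brackets s (match_brackets s)

-- ===== LEMMAS AND PROOFS =====

def pvEntry (c : Char) : PvE :=
  if c = '(' then PvE.op else if c = ')' then PvE.cl else PvE.num 0

def pvIsNum : PvE → Bool
  | .num _ => true
  | _ => false

-- reference stack run over entries: final stack and the matched (open, close) pairs in closing order
def pvRunC : Nat → List PvE → List Nat → Option (List Nat × List (Nat × Nat))
  | _, [], st => some (st, [])
  | j, PvE.op :: l, st => pvRunC (j + 1) l (j :: st)
  | _, PvE.cl :: _, [] => none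
  | j, PvE.cl :: l, i :: st =>
    match pvRunC (j + 1) l st with
    | none => none
    | some r => some (r.1, (i, j) :: r.2)
  | j, PvE.num _ :: l, st => pvRunC (j + 1) l st

def pvApplyP (out : List Int) (ps : List (Nat × Nat)) : List Int :=
  ps.foldl (fun o p => (o.set p.1 ((p.2 : Int) - (p.1 : Int))).set p.2 ((p.1 : Int) - (p.2 : Int))) out

lemma pvApplyP_nil (out : List Int) : pvApplyP out [] = out := rfl

lemma pvApplyP_cons (out : List Int) (p : Nat × Nat) (ps : List (Nat × Nat)) :
    pvApplyP out (p :: ps) =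
      pvApplyP ((out.set p.1 ((p.2 : Int) - (p.1 : Int))).set p.2 ((p.1 : Int) - (p.2 : Int))) ps := rfl

lemma pvApplyP_append (out : List Int) (ps1 ps2 : List (Nat × Nat)) :
    pvApplyP out (ps1 ++ ps2) = pvApplyP (pvApplyP out ps1) ps2 := by
  simp [pvApplyP, List.foldl_append]

lemma pvBLoop_runC : ∀ (chars : List Char) (j : Nat) (st : List Nat) (out : List Int),
    pvBLoop chars j st out =
      match pvRunC j (chars.map pvEntry) st with
      | none => none
      | some r => if r.1 = [] then some (pvApplyP out r.2) else none
  | [], j, st, out => by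
      cases st <;> simp [pvBLoop, pvRunC, pvApplyP_nil]
  | c :: rest, j, st, out => by
      by_cases h1 : c = '('
      · simp [pvBLoop, h1, pvEntry, pvRunC, pvBLoop_runC rest]
      · by_cases h2 : c = ')'
        · cases st with
          | nil => simp [pvBLoop, h1, h2, pvEntry, pvRunC]
          | cons i st =>
            cases hr : pvRunC (j + 1) (rest.map pvEntry) st with
            | none => simp [pvBLoop, h1, h2, pvEntry, pvRunC, pvBLoop_runC rest, hr]
            | some r => simp [pvBLoop, h1, h2, pvEntry, pvRunC, pvBLoop_runC rest, hr, pvApplyP_cons]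
        · simp [pvBLoop, h1, h2, pvEntry, pvRunC, pvBLoop_runC rest]

lemma pvFirstLoopA_runC : ∀ (chars : List Char) (j : Nat) (st : List Nat) (acc : List PvE),
    pvFirstLoopA chars ((st.length : Int)) acc =
      match pvRunC j (chars.map pvEntry) st with
      | none => none
      | some r => some (((r.1.length : Int)), acc.reverse ++ chars.map pvEntry)
  | [], j, st, acc => by simp [pvFirstLoopA, pvRunC]
  | c :: rest, j, st, acc => by
      by_cases h1 : c = '('
      · have h0 : ¬ ((st.length : Int) + 1 < 0) := by omega
        have ih := pvFirstLoopA_runC rest (j + 1) (j :: st) (PvE.op :: acc)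
        simp only [List.length_cons, Nat.cast_add, Nat.cast_one] at ih
        simp [pvFirstLoopA, h1, pvEntry, pvRunC, h0, ih]
      · by_cases h2 : c = ')'
        · cases st with
          | nil =>
            have h0 : ((([] : List Nat).length : Int)) - 1 < 0 := by simp
            simp [pvFirstLoopA, h1, h2, pvEntry, pvRunC, h0]
          | cons i st =>
            have h0 : ¬ (((i :: st).length : Int) - 1 < 0) := by
              simp only [List.length_cons]; push_cast; omega
            have ih := pvFirstLoopA_runC rest (j + 1) st (PvE.cl :: acc)
            have hl : ((i :: st).length : Int) - 1 = (st.length : Int) := by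
              simp only [List.length_cons]; push_cast; omega
            cases hr : pvRunC (j + 1) (rest.map pvEntry) st with
            | none => simp [pvFirstLoopA, h1, h2, pvEntry, pvRunC, h0, hl, ih, hr]
            | some r => simp [pvFirstLoopA, h1, h2, pvEntry, pvRunC, h0, hl, ih, hr]
        · have h0 : ¬ ((st.length : Int) < 0) := by omega
          simp [pvFirstLoopA, h1, h2, pvEntry, pvRunC, h0, pvFirstLoopA_runC rest (j + 1) st (PvE.num 0 :: acc)]

lemma pvRunC_append : ∀ (l1 l2 : List PvE) (j : Nat) (st : List Nat),
    pvRunC j (l1 ++ l2) st =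
      match pvRunC j l1 st with
      | none => none
      | some r =>
        match pvRunC (j + l1.length) l2 r.1 with
        | none => none
        | some r2 => some (r2.1, r.2 ++ r2.2)
  | [], l2, j, st => by
      cases hr : pvRunC j l2 st <;> simp [pvRunC, hr]
  | PvE.op :: l1, l2, j, st => by
      have ih := pvRunC_append l1 l2 (j + 1) (j :: st)
      simp only [List.cons_append, pvRunC, ih, List.length_cons]
      cases hr : pvRunC (j + 1) l1 (j :: st) with
      | none => simp
      | some r =>
        have : j + 1 + l1.length = j + (l1.length + 1) := by omega
        simp [this]
  | PvE.cl :: l1, l2, j, st => by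
      cases st with
      | nil => simp [pvRunC]
      | cons i st =>
        have ih := pvRunC_append l1 l2 (j + 1) st
        simp only [List.cons_append, pvRunC, ih, List.length_cons]
        cases hr : pvRunC (j + 1) l1 st with
        | none => simp
        | some r =>
          have h3 : j + 1 + l1.length = j + (l1.length + 1) := by omega
          simp only [h3]
          cases hr2 : pvRunC (j + (l1.length + 1)) l2 r.1 <;> simp
  | PvE.num n :: l1, l2, j, st => by
      have ih := pvRunC_append l1 l2 (j + 1) st
      simp only [List.cons_append, pvRunC, ih, List.length_cons]
      cases hr : pvRunC (j + 1) l1 st with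
      | none => simp
      | some r =>
        have : j + 1 + l1.length = j + (l1.length + 1) := by omega
        simp [this]

lemma pvRunC_nums : ∀ (l : List PvE), (∀ e ∈ l, pvIsNum e = true) → ∀ (j : Nat) (st : List Nat),
    pvRunC j l st = some (st, [])
  | [], _, j, st => rfl
  | e :: rest, h, j, st => by
      have he : pvIsNum e = true := h e (by simp)
      cases e with
      | num n =>
        exact pvRunC_nums rest (fun x hx => h x (by simp [hx])) (j + 1) st
      | op => simp [pvIsNum] at he
      | cl => simp [pvIsNum] at he

lemma pvRunC_pairs_length : ∀ (l : List PvE) (j : Nat) (st : List Nat) (r : List Nat × List (Nat × Nat)),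
    pvRunC j l st = some r → r.2.length ≤ l.length
  | [], j, st, r => by intro h; simp [pvRunC] at h; simp [← h]
  | PvE.op :: l, j, st, r => by
      intro h
      have := pvRunC_pairs_length l (j + 1) (j :: st) r h
      simpa using Nat.le_succ_of_le this
  | PvE.cl :: l, j, st, r => by
      intro h
      cases st with
      | nil => simp [pvRunC] at h
      | cons i st =>
        simp only [pvRunC] at h
        cases hr : pvRunC (j + 1) l st with
        | none => simp [hr] at h
        | some r' =>
          have := pvRunC_pairs_length l (j + 1) st r' hr
          simp [hr] at h
          simp [← h]
          omega
  | PvE.num n :: l, j, st, r => by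
      intro h
      have := pvRunC_pairs_length l (j + 1) st r h
      simpa using Nat.le_succ_of_le this

lemma pvRunC_bound : ∀ (l : List PvE) (j : Nat) (st : List Nat) (r : List Nat × List (Nat × Nat)),
    pvRunC j l st = some r →
    ∀ p ∈ r.2, (p.1 ∈ st ∨ (j ≤ p.1 ∧ p.1 < j + l.length)) ∧ j ≤ p.2 ∧ p.2 < j + l.length
  | [], j, st, r => by intro h; simp [pvRunC] at h; simp [← h]
  | PvE.op :: l, j, st, r => by
      intro h p hp
      have := pvRunC_bound l (j + 1) (j :: st) r h p hp
      simp only [List.mem_cons] at this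
      simp only [List.length_cons]
      rcases this with ⟨h1, h2, h3⟩
      refine ⟨?_, by omega, by omega⟩
      rcases h1 with (h1 | h1) | h1
      · right; omega
      · left; exact h1
      · right; omega
  | PvE.cl :: l, j, st, r => by
      intro h p hp
      cases st with
      | nil => simp [pvRunC] at h
      | cons i st =>
        simp only [pvRunC] at h
        cases hr : pvRunC (j + 1) l st with
        | none => simp [hr] at h
        | some r' =>
          simp [hr] at h
          rw [← h] at hp
          simp only [List.length_cons]
          rcases List.mem_cons.mp hp with hp | hp
          · subst hp
            exact ⟨Or.inl (by simp), by omega, by omega⟩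
          · have := pvRunC_bound l (j + 1) st r' hr p hp
            rcases this with ⟨h1, h2, h3⟩
            refine ⟨?_, by omega, by omega⟩
            rcases h1 with h1 | h1
            · left; simp [h1]
            · right; omega
  | PvE.num n :: l, j, st, r => by
      intro h p hp
      have := pvRunC_bound l (j + 1) st r h p hp
      simp only [List.length_cons]
      rcases this with ⟨h1, h2, h3⟩
      refine ⟨?_, by omega, by omega⟩
      rcases h1 with h1 | h1
      · left; exact h1
      · right; omega

lemma pvLoop1A_fst : ∀ (l : List PvE) (i : Nat) (counter : Int) (copen : Option Nat),
    (pvLoop1A l i counter copen).1 = counter + (l.countP pvIsNum : Int)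
  | [], i, counter, copen => by simp [pvLoop1A]
  | e :: rest, i, counter, copen => by
      cases e with
      | op =>
        simp [pvLoop1A, pvIsNum, List.countP_cons, pvLoop1A_fst rest]
      | cl =>
        have : ¬ (PvE.cl ≠ PvE.op ∧ PvE.cl ≠ PvE.cl) := by simp
        simp [pvLoop1A, this, pvIsNum, List.countP_cons, pvLoop1A_fst rest]
      | num n =>
        have h1 : (PvE.num n) ≠ PvE.op := by simp
        have h2 : (PvE.num n ≠ PvE.op ∧ PvE.num n ≠ PvE.cl) := by simp
        simp [pvLoop1A, h1, h2, pvIsNum, List.countP_cons, pvLoop1A_fst rest]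
        push_cast
        ring

def pvLastOp : List PvE → Option Nat
  | [] => none
  | e :: rest =>
    match pvLastOp rest with
    | some k => some (k + 1)
    | none => if e = PvE.op then some 0 else none

lemma pvLoop1A_snd : ∀ (l : List PvE) (i : Nat) (counter : Int) (copen : Option Nat),
    (pvLoop1A l i counter copen).2 =
      match pvLastOp l with
      | some k => some (i + k)
      | none => copen
  | [], i, counter, copen => by simp [pvLoop1A, pvLastOp]
  | e :: rest, i, counter, copen => by
      cases hk : pvLastOp rest with
      | some k =>
        cases e with
        | op =>
          simp [pvLoop1A, pvLastOp, hk, pvLoop1A_snd rest]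
          omega
        | cl =>
          have : ¬ (PvE.cl ≠ PvE.op ∧ PvE.cl ≠ PvE.cl) := by simp
          simp [pvLoop1A, this, pvLastOp, hk, pvLoop1A_snd rest]
          omega
        | num n =>
          have h1 : (PvE.num n) ≠ PvE.op := by simp
          have h2 : (PvE.num n ≠ PvE.op ∧ PvE.num n ≠ PvE.cl) := by simp
          simp [pvLoop1A, h1, h2, pvLastOp, hk, pvLoop1A_snd rest]
          omega
      | none =>
        cases e with
        | op => simp [pvLoop1A, pvLastOp, hk, pvLoop1A_snd rest]
        | cl =>
          have : ¬ (PvE.cl ≠ PvE.op ∧ PvE.cl ≠ PvE.cl) := by simp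
          simp [pvLoop1A, this, pvLastOp, hk, pvLoop1A_snd rest]
        | num n =>
          have h1 : (PvE.num n) ≠ PvE.op := by simp
          have h2 : (PvE.num n ≠ PvE.op ∧ PvE.num n ≠ PvE.cl) := by simp
          simp [pvLoop1A, h1, h2, pvLastOp, hk, pvLoop1A_snd rest]

lemma pvLastOp_none : ∀ (l : List PvE), pvLastOp l = none → ∀ e ∈ l, e ≠ PvE.op
  | [], _, e, he => by simp at he
  | x :: rest, h, e, he => by
      simp only [pvLastOp] at h
      cases hk : pvLastOp rest with
      | some k => simp [hk] at h
      | none =>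
        simp [hk] at h
        rcases List.mem_cons.mp he with he | he
        · subst he; simpa using h
        · exact pvLastOp_none rest hk e he

lemma pvLastOp_split : ∀ (l : List PvE) (k : Nat), pvLastOp l = some k →
    ∃ P T, l = P ++ PvE.op :: T ∧ P.length = k ∧ ∀ e ∈ T, e ≠ PvE.op
  | [], k, h => by simp [pvLastOp] at h
  | x :: rest, k, h => by
      simp only [pvLastOp] at h
      cases hk : pvLastOp rest with
      | some k' =>
        simp [hk] at h
        obtain ⟨P, T, h1, h2, h3⟩ := pvLastOp_split rest k' hk
        exact ⟨x :: P, T, by simp [h1], by simp [h2, ← h], h3⟩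
      | none =>
        simp [hk] at h
        by_cases hx : x = PvE.op
        · simp [hx] at h
          exact ⟨[], rest, by simp [hx], by simp [← h], pvLastOp_none rest hk⟩
        · simp [hx] at h

lemma pvFirstCl_split : ∀ (T : List PvE), PvE.cl ∈ T →
    ∃ M S, T = M ++ PvE.cl :: S ∧ ∀ e ∈ M, e ≠ PvE.cl
  | [], h => by simp at h
  | x :: rest, h => by
      by_cases hx : x = PvE.cl
      · exact ⟨[], rest, by simp [hx], by simp⟩
      · have : PvE.cl ∈ rest := by
          rcases List.mem_cons.mp h with h | h
          · exact absurd h.symm hx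
          · exact h
        obtain ⟨M, S, h1, h2⟩ := pvFirstCl_split rest this
        refine ⟨x :: M, S, by simp [h1], ?_⟩
        intro e he
        rcases List.mem_cons.mp he with he | he
        · subst he; exact hx
        · exact h2 e he

lemma pvFindCloseA_spec : ∀ (M : List PvE) (S : List PvE) (c : Nat), (∀ e ∈ M, e ≠ PvE.cl) →
    pvFindCloseA (M ++ PvE.cl :: S) c = some (c + M.length)
  | [], S, c, h => by simp [pvFindCloseA]
  | x :: M, S, c, h => by
      have hx : x ≠ PvE.cl := h x (by simp)
      have := pvFindCloseA_spec M S (c + 1) (fun e he => h e (by simp [he]))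
      simp [pvFindCloseA, hx, this]
      omega

lemma pvSetMid : ∀ (P R : List PvE) (y : PvE) (x : PvE), ((P ++ x :: R).set P.length y) = P ++ y :: R
  | [], R, y, x => by simp
  | p :: P, R, y, x => by simp [List.set_cons_succ, pvSetMid P R y x]

lemma pvApplyP_set_comm : ∀ (ps : List (Nat × Nat)) (base : List Int) (a b : Nat) (x y : Int),
    (∀ p ∈ ps, p.1 ≠ a ∧ p.1 ≠ b ∧ p.2 ≠ a ∧ p.2 ≠ b) →
    pvApplyP ((base.set a x).set b y) ps = ((pvApplyP base ps).set a x).set b y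
  | [], base, a, b, x, y, h => by simp [pvApplyP_nil]
  | p :: ps, base, a, b, x, y, h => by
      obtain ⟨h1, h2, h3, h4⟩ := h p (by simp)
      rw [pvApplyP_cons, pvApplyP_cons]
      have e1 : (((base.set a x).set b y).set p.1 ((p.2 : Int) - (p.1 : Int))).set p.2 ((p.1 : Int) - (p.2 : Int)) =
          (((base.set p.1 ((p.2 : Int) - (p.1 : Int))).set p.2 ((p.1 : Int) - (p.2 : Int))).set a x).set b y := by
        rw [List.set_comm _ _ (Ne.symm h2), List.set_comm _ _ (Ne.symm h1),
            List.set_comm _ _ (Ne.symm h4), List.set_comm _ _ (Ne.symm h3)]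
      rw [e1]
      exact pvApplyP_set_comm ps _ a b x y (fun q hq => h q (by simp [hq]))

lemma pvCountP_ne_length_exists (l : List PvE) (h : l.countP pvIsNum ≠ l.length) :
    ∃ e ∈ l, pvIsNum e = false := by
  by_contra hc
  push_neg at hc
  have : ∀ e ∈ l, pvIsNum e = true := by
    intro e he
    cases hh : pvIsNum e
    · exact absurd hh (hc e he)
    · rfl
  exact h (List.countP_eq_length.mpr (by intro a ha; simpa using this a ha))

lemma pvNoBracket_isNum (e : PvE) (h1 : e ≠ PvE.op) (h2 : e ≠ PvE.cl) : pvIsNum e = true := by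
  cases e with
  | op => exact absurd rfl h1
  | cl => exact absurd rfl h2
  | num n => rfl

lemma pvMapToInt0_entry : ∀ (chars : List Char),
    (chars.map pvEntry).map pvToInt0 = List.replicate chars.length 0
  | [] => rfl
  | c :: rest => by
      have : pvToInt0 (pvEntry c) = 0 := by
        unfold pvEntry
        split_ifs <;> rfl
      simp [this, pvMapToInt0_entry rest, List.replicate_succ]

-- setting positions P.length and P.length+1+M.length in P ++ o :: (M ++ c :: S)
lemma pvSetTwo (P M S : List PvE) (o c x y : PvE) :
    ((P ++ o :: (M ++ c :: S)).set P.length x).set (P.length + 1 + M.length) y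
      = P ++ x :: (M ++ y :: S) := by
  rw [pvSetMid]
  have e1 : P ++ x :: (M ++ c :: S) = (P ++ x :: M) ++ c :: S := by simp
  rw [e1]
  have e2 : P.length + 1 + M.length = (P ++ x :: M).length := by simp; omega
  rw [e2, pvSetMid]
  simp

-- the main helper lemma: A's recursive helper computes exactly the stack algorithm's output
lemma pvHelperA_spec : ∀ (fuel : Nat) (lst : List PvE) (ps : List (Nat × Nat)),
    pvRunC 0 lst [] = some ([], ps) → ps.length ≤ fuel →
    (pvHelperA fuel lst).map pvToInt0 = pvApplyP (lst.map pvToInt0) ps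
  | 0, lst, ps, hrun, hlen => by
      have hps : ps = [] := List.length_eq_zero_iff.mp (Nat.le_zero.mp hlen)
      subst hps
      simp [pvHelperA, pvApplyP_nil]
  | fuel + 1, lst, ps, hrun, hlen => by
      by_cases hc : (pvLoop1A lst 0 0 none).1 = (lst.length : Int)
      · -- no brackets remain: helper stops; ps must be empty
        have hcount : lst.countP pvIsNum = lst.length := by
          have h' := hc
          rw [pvLoop1A_fst] at h'
          omega
        have hall : ∀ e ∈ lst, pvIsNum e = true := fun e he => List.countP_eq_length.mp hcount e he
        rw [pvRunC_nums lst hall 0 []] at hrun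
        injection hrun with h
        injection h with h1 h2
        rw [← h2]
        simp [pvHelperA, hc, pvApplyP_nil]
      · -- a bracket remains: one matching step, then induction
        have hcount : lst.countP pvIsNum ≠ lst.length := by
          intro hcc
          apply hc
          rw [pvLoop1A_fst]
          simp [hcc]
        have hop : ∃ k, pvLastOp lst = some k := by
          cases hk : pvLastOp lst with
          | some k => exact ⟨k, rfl⟩
          | none =>
            exfalso
            have hnoop := pvLastOp_none lst hk
            have hnum : ∀ (l : List PvE), (∀ e ∈ l, e ≠ PvE.op) →
                (∀ j r, pvRunC j l [] = some r → ∀ e ∈ l, pvIsNum e = true) := by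
              intro l
              induction l with
              | nil => intro _ j r _ e he; simp at he
              | cons x rest ih =>
                intro hno j r hr e he
                cases x with
                | op => exact absurd rfl (hno PvE.op (by simp))
                | cl => simp [pvRunC] at hr
                | num n =>
                  rcases List.mem_cons.mp he with he | he
                  · subst he; rfl
                  · exact ih (fun a ha => hno a (by simp [ha])) (j + 1) r (by simpa [pvRunC] using hr) e he
            obtain ⟨e, he, hfe⟩ := pvCountP_ne_length_exists lst hcount
            have := hnum lst hnoop 0 ([], ps) hrun e he
            rw [this] at hfe
            cases hfe
        obtain ⟨k, hk⟩ := hop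
        obtain ⟨P, T, hlst, hPlen, hTnoop⟩ := pvLastOp_split lst k hk
        subst hlst
        subst hPlen
        rw [pvRunC_append] at hrun
        simp only [Nat.zero_add] at hrun
        cases hr1 : pvRunC 0 P [] with
        | none => rw [hr1] at hrun; exact absurd hrun (by simp)
        | some r1 =>
          rw [hr1] at hrun
          simp only at hrun
          cases hr2 : pvRunC P.length (PvE.op :: T) r1.1 with
          | none => rw [hr2] at hrun; exact absurd hrun (by simp)
          | some r2 =>
            rw [hr2] at hrun
            simp only [Option.some_inj] at hrun
            have hst2 : r2.1 = [] := congrArg Prod.fst hrun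
            have hps : ps = r1.2 ++ r2.2 := (congrArg Prod.snd hrun).symm
            have hr2' : pvRunC (P.length + 1) T (P.length :: r1.1) = some r2 := by
              simpa only [pvRunC] using hr2
            have hclT : PvE.cl ∈ T := by
              by_contra hnc
              have hTnum : ∀ e ∈ T, pvIsNum e = true :=
                fun e he => pvNoBracket_isNum e (hTnoop e he) (fun hh => hnc (hh ▸ he))
              rw [pvRunC_nums T hTnum] at hr2'
              have h3 : P.length :: r1.1 = r2.1 := congrArg Prod.fst (Option.some_inj.mp hr2')
              rw [hst2] at h3
              simp at h3
            obtain ⟨M, S, hT, hMnocl⟩ := pvFirstCl_split T hclT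
            subst hT
            have hMnum : ∀ e ∈ M, pvIsNum e = true :=
              fun e he => pvNoBracket_isNum e (hTnoop e (by simp [he])) (hMnocl e he)
            rw [pvRunC_append] at hr2'
            rw [pvRunC_nums M hMnum] at hr2'
            simp only [pvRunC] at hr2'
            cases hrS : pvRunC (P.length + 1 + M.length + 1) S r1.1 with
            | none =>
              rw [hrS] at hr2'
              exact absurd hr2' (by simp)
            | some rS =>
              rw [hrS] at hr2'
              simp only [List.nil_append, Option.some_inj] at hr2'
              have hrS1 : rS.1 = [] := (congrArg Prod.fst hr2').trans hst2
              have hr22 : r2.2 = (P.length, P.length + 1 + M.length) :: rS.2 :=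
                (congrArg Prod.snd hr2').symm
              -- helper's one step
              have hcopen : (pvLoop1A (P ++ PvE.op :: (M ++ PvE.cl :: S)) 0 0 none).2 = some P.length := by
                rw [pvLoop1A_snd, hk]
                simp
              have hdrop : (P ++ PvE.op :: (M ++ PvE.cl :: S)).drop P.length = PvE.op :: (M ++ PvE.cl :: S) :=
                List.drop_left
              have hfind : pvFindCloseA ((P ++ PvE.op :: (M ++ PvE.cl :: S)).drop P.length) P.length
                  = some (P.length + 1 + M.length) := by
                rw [hdrop]
                have hstep1 : pvFindCloseA (PvE.op :: (M ++ PvE.cl :: S)) P.length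
                    = pvFindCloseA (M ++ PvE.cl :: S) (P.length + 1) := by
                  simp [pvFindCloseA]
                rw [hstep1, pvFindCloseA_spec M S _ hMnocl]
              have hset : ((P ++ PvE.op :: (M ++ PvE.cl :: S)).set P.length
                      (PvE.num (((P.length + 1 + M.length : Nat) : Int) - (P.length : Int)))).set
                      (P.length + 1 + M.length)
                      (PvE.num ((P.length : Int) - ((P.length + 1 + M.length : Nat) : Int)))
                  = P ++ PvE.num (((P.length + 1 + M.length : Nat) : Int) - (P.length : Int)) ::
                      (M ++ PvE.num ((P.length : Int) - ((P.length + 1 + M.length : Nat) : Int)) :: S) :=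
                pvSetTwo P M S _ _ _ _
              have hstep : pvHelperA (fuel + 1) (P ++ PvE.op :: (M ++ PvE.cl :: S)) =
                  pvHelperA fuel (P ++ PvE.num (((P.length + 1 + M.length : Nat) : Int) - (P.length : Int)) ::
                      (M ++ PvE.num ((P.length : Int) - ((P.length + 1 + M.length : Nat) : Int)) :: S)) := by
                rw [pvHelperA]
                rw [if_neg hc]
                rw [hcopen]
                simp only [Option.getD_some]
                rw [hfind]
                exact congrArg (pvHelperA fuel) hset
              -- the run on the updated list
              have hmid : pvRunC P.length
                    (PvE.num (((P.length + 1 + M.length : Nat) : Int) - (P.length : Int)) ::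
                      (M ++ PvE.num ((P.length : Int) - ((P.length + 1 + M.length : Nat) : Int)) :: S)) r1.1
                  = some (rS.1, rS.2) := by
                simp only [pvRunC]
                rw [pvRunC_append]
                rw [pvRunC_nums M hMnum]
                simp only [pvRunC]
                rw [hrS]
                simp
              have hrun' : pvRunC 0 (P ++ PvE.num (((P.length + 1 + M.length : Nat) : Int) - (P.length : Int)) ::
                      (M ++ PvE.num ((P.length : Int) - ((P.length + 1 + M.length : Nat) : Int)) :: S)) []
                  = some ([], r1.2 ++ rS.2) := by
                rw [pvRunC_append, hr1]
                simp only [Nat.zero_add]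
                rw [hmid]
                simp [hrS1]
              have hlen' : (r1.2 ++ rS.2).length ≤ fuel := by
                rw [hps, hr22] at hlen
                simp at hlen ⊢
                omega
              rw [hstep]
              rw [pvHelperA_spec fuel _ (r1.2 ++ rS.2) hrun' hlen']
              -- pure applyP reasoning
              have hbase : (P ++ PvE.num (((P.length + 1 + M.length : Nat) : Int) - (P.length : Int)) ::
                      (M ++ PvE.num ((P.length : Int) - ((P.length + 1 + M.length : Nat) : Int)) :: S)).map pvToInt0
                  = (((P ++ PvE.op :: (M ++ PvE.cl :: S)).map pvToInt0).set P.length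
                        (((P.length + 1 + M.length : Nat) : Int) - (P.length : Int))).set
                        (P.length + 1 + M.length)
                        ((P.length : Int) - ((P.length + 1 + M.length : Nat) : Int)) := by
                rw [← hset]
                rw [List.map_set, List.map_set]
                rfl
              rw [hbase, hps, hr22]
              rw [pvApplyP_append, pvApplyP_append]
              rw [pvApplyP_cons]
              have hdisj : ∀ p ∈ r1.2, p.1 ≠ P.length ∧ p.1 ≠ P.length + 1 + M.length ∧
                  p.2 ≠ P.length ∧ p.2 ≠ P.length + 1 + M.length := by
                intro p hp
                have hb := pvRunC_bound P 0 [] r1 hr1 p hp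
                rcases hb with ⟨h1, h2, h3⟩
                have hp1 : p.1 < P.length := by
                  rcases h1 with h1 | h1
                  · simp at h1
                  · omega
                have hp2 : p.2 < P.length := by omega
                exact ⟨by omega, by omega, by omega, by omega⟩
              rw [pvApplyP_set_comm r1.2 _ _ _ _ _ hdisj]

-- ===== VERDICT (by name: the statement is the Claim_ definition above) =====
theorem match_brackets_spec : Claim_equal_match_brackets := by
  intro s _
  unfold Spec_match_brackets match_brackets match_brackets_alt
  have hF := pvFirstLoopA_runC s.toList 0 [] []
  have hB := pvBLoop_runC s.toList 0 [] (List.replicate s.toList.length 0)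
  simp only [List.length_nil, Nat.cast_zero] at hF
  cases hr : pvRunC 0 (s.toList.map pvEntry) [] with
  | none =>
    rw [hr] at hF hB
    simp only at hF hB
    rw [hF, hB]
  | some r =>
    rw [hr] at hF hB
    simp only [List.reverse_nil, List.nil_append] at hF
    rw [hF, hB]
    dsimp only
    by_cases hst : r.1 = []
    · have hc0 : ¬ (((r.1.length : Int)) > 0 ∨ ((r.1.length : Int)) < 0) := by
        simp [hst]
      rw [if_neg hc0, if_pos hst]
      have hrun : pvRunC 0 (s.toList.map pvEntry) [] = some ([], r.2) := by
        rw [hr, ← hst]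
      have hlen : r.2.length ≤ (s.toList.map pvEntry).length + 1 := by
        have := pvRunC_pairs_length (s.toList.map pvEntry) 0 [] ([], r.2) hrun
        simp at this ⊢
        omega
      rw [pvHelperA_spec ((s.toList.map pvEntry).length + 1) (s.toList.map pvEntry) r.2 hrun hlen]
      rw [pvMapToInt0_entry]
    · have hc0 : (((r.1.length : Int)) > 0 ∨ ((r.1.length : Int)) < 0) := by
        left
        have : r.1.length ≠ 0 := by
          intro hh
          exact hst (List.length_eq_zero_iff.mp hh)
        omega
      rw [if_pos hc0, if_neg hst]
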